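-- pv_equiv track=rewrite | github.com/antoinelemor/CCF-canadian-climate-framing | Scripts/Annotation/7_Annotation.py | classify_categories
-- ===== SOURCE A (Python) =====
-- from typing import Any, Dict, List, Optional, Tuple
--
-- def classify_categories(model_dict: Dict[str, Dict[str, str]]) -> Tuple[List[str], List[str], List[str]]:
--     """
--     From a dictionary of {base_category -> {lang -> model_path}},
--     classify them into 3 lists: detection, sub, other, sorted by name.
--
--     Parameters
--     ----------
--     model_dict : Dict[str, Dict[str, str]]
--         The parsed model dictionary.
--
--     Returns
--     -------
--     Tuple[List[str], List[str], List[str]]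
--         (detection_list, sub_list, other_list)
--         Each is a list of base category names that end with:
--          - "_Detection"
--          - "_SUB"
--          - neither
--     """
--     detection, subcat, other = [], [], []
--     for base_cat in sorted(model_dict.keys()):
--         if base_cat.endswith("_Detection"):
--             detection.append(base_cat)
--         elif base_cat.endswith("_SUB"):
--             subcat.append(base_cat)
--         else:
--             other.append(base_cat)
--     return (detection, subcat, other)
-- ===== SOURCE B (Python) =====
-- def classify_categories(model_dict):
--     """Three independent filter-then-sort scans instead of one branching pass."""
--     detection = sorted(k for k in model_dict if k.endswith("_Detection"))
--     subcat = sorted(k for k in model_dict if k.endswith("_SUB"))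
--     other = sorted(k for k in model_dict
--                    if not k.endswith("_Detection") and not k.endswith("_SUB"))
--     return (detection, subcat, other)
-- ===== Notes on version B (the rewrite author's own statement) =====
-- stated objective: alternative
-- what changed: Replaces the single sorted pass with if/elif/else appends by three independent filter-then-sort comprehensions, one per output list.
import Mathlib
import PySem

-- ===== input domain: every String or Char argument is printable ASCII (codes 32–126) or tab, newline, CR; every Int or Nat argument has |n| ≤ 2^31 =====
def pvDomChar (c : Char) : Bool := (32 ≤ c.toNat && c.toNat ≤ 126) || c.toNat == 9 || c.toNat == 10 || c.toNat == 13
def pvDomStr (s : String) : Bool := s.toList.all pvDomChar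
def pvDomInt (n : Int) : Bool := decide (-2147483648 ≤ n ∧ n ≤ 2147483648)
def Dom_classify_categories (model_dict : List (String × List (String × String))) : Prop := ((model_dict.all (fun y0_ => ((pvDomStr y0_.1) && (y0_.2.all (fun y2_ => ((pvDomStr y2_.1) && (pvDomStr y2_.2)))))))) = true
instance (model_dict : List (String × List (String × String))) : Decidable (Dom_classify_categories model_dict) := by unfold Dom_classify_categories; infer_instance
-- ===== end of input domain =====

-- B replaces A's single sorted pass with if/elif/else appends by three independent
-- filter-then-sort scans (objective: alternative decomposition, same cost).

-- shared suffix tests (k.endswith("_Detection") / k.endswith("_SUB"))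
def pDet (k : String) : Bool := PySem.Str.endswith k "_Detection"
def pSub (k : String) : Bool := PySem.Str.endswith k "_SUB"

-- ===== PORT A =====
-- one pass over sorted(model_dict.keys()) appending into three accumulators
def classify_categories (model_dict : List (String × List (String × String))) : List String × List String × List String :=
  (PySem.List.sorted (PySem.List.dedup (model_dict.map (fun p => p.1))) (fun x => x) false).foldl
    (fun (acc : List String × List String × List String) k =>
      if pDet k then (acc.1 ++ [k], acc.2.1, acc.2.2)
      else if pSub k then (acc.1, acc.2.1 ++ [k], acc.2.2)
      else (acc.1, acc.2.1, acc.2.2 ++ [k]))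
    ([], [], [])

-- ===== PORT B =====
-- three independent filter-then-sort scans over the keys
def classify_categories_alt (model_dict : List (String × List (String × String))) : List String × List String × List String :=
  let keys := PySem.List.dedup (model_dict.map (fun p => p.1))
  (PySem.List.sorted (keys.filter (fun k => pDet k)) (fun x => x) false,
   PySem.List.sorted (keys.filter (fun k => pSub k)) (fun x => x) false,
   PySem.List.sorted (keys.filter (fun k => !pDet k && !pSub k)) (fun x => x) false)

-- ===== PRECONDITION & SPEC =====
def Spec_classify_categories (model_dict : List (String × List (String × String))) (out : List String × List String × List String) : Prop := out = classify_categories_alt model_dict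
instance (model_dict : List (String × List (String × String))) (out : List String × List String × List String) : Decidable (Spec_classify_categories model_dict out) := by unfold Spec_classify_categories; infer_instance

-- ===== CLAIM (what is proved, stated in full; the proofs are below) =====
def Claim_equal_classify_categories : Prop := ∀ (model_dict : List (String × List (String × String))), Dom_classify_categories model_dict → Spec_classify_categories model_dict (classify_categories model_dict)

-- ===== LEMMAS AND PROOFS =====

-- a shorter suffix of a list is a suffix of any longer suffix of that list
lemma suffix_of_suffix_of_length_le {α : Type} (a b l : List α)
    (ha : a <:+ l) (hb : b <:+ l) (h : a.length ≤ b.length) : a <:+ b := by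
  obtain ⟨u, hu⟩ := ha
  obtain ⟨t, ht⟩ := hb
  have h1 : u.length + a.length = l.length := by rw [← hu]; simp
  have h2 : t.length + b.length = l.length := by rw [← ht]; simp
  have hau : a = l.drop u.length := by rw [← hu, List.drop_left]
  have hbt : b = l.drop t.length := by rw [← ht, List.drop_left]
  have : b.drop (u.length - t.length) = a := by
    rw [hbt, List.drop_drop, hau]
    congr 1
    omega
  exact this ▸ List.drop_suffix _ _

-- a key ending in "_SUB" does not end in "_Detection"
lemma pSub_not_pDet (k : String) (h : pSub k = true) : pDet k = false := by
  cases hd : pDet k with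
  | false => rfl
  | true =>
    exfalso
    have h1 : "_SUB".toList <:+ k.toList := by
      have := h
      simp only [pSub, PySem.Str.endswith_eq] at this
      exact (PySem.Chars.endswith_iff _ _).mp this
    have h2 : "_Detection".toList <:+ k.toList := by
      have := hd
      simp only [pDet, PySem.Str.endswith_eq] at this
      exact (PySem.Chars.endswith_iff _ _).mp this
    have h3 : "_SUB".toList <:+ "_Detection".toList :=
      suffix_of_suffix_of_length_le _ _ _ h1 h2 (by decide)
    exact absurd h3 (by decide)

-- A's loop collects, in order, the elements of each branch's filter
lemma foldA_eq (s : List String) (a b c : List String) :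
    s.foldl
      (fun (acc : List String × List String × List String) k =>
        if pDet k then (acc.1 ++ [k], acc.2.1, acc.2.2)
        else if pSub k then (acc.1, acc.2.1 ++ [k], acc.2.2)
        else (acc.1, acc.2.1, acc.2.2 ++ [k]))
      (a, b, c)
    = (a ++ s.filter (fun k => pDet k),
       b ++ s.filter (fun k => !pDet k && pSub k),
       c ++ s.filter (fun k => !pDet k && !pSub k)) := by
  induction s generalizing a b c with
  | nil => simp
  | cons x xs ih =>
    cases hd : pDet x with
    | true => simp [List.foldl_cons, hd, ih]
    | false =>
      cases hs : pSub x with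
      | true => simp [List.foldl_cons, hd, hs, ih]
      | false => simp [List.foldl_cons, hd, hs, ih]

-- sorting the filtered keys equals filtering the sorted (duplicate-free) keys
lemma sorted_filter_dedup (xs : List String) (p : String → Bool) :
    PySem.List.sorted ((PySem.List.dedup xs).filter p) (fun x => x) false
      = (PySem.List.sorted (PySem.List.dedup xs) (fun x => x) false).filter p := by
  apply PySem.List.sorted_eq_of_perm_of_pairwise_lt
  · exact (PySem.List.sorted_perm _ _ _).filter p
  · exact ((PySem.List.sorted_ofList_pairwise_lt (xs := xs)).sublist
      List.filter_sublist).imp (by intro a b h; simpa using h)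

-- ===== VERDICT (by name: the statement is the Claim_ definition above) =====
theorem classify_categories_spec : Claim_equal_classify_categories := by
  intro md _
  unfold Spec_classify_categories classify_categories classify_categories_alt
  rw [foldA_eq]
  simp only [List.nil_append]
  refine Prod.ext ?_ (Prod.ext ?_ ?_) <;> simp only []
  · rw [sorted_filter_dedup]
  · have hf : ∀ (l : List String), l.filter (fun k => pSub k) = l.filter (fun k => !pDet k && pSub k) := by
      intro l
      apply List.filter_congr
      intro k _
      cases hs : pSub k with
      | true => simp [pSub_not_pDet k hs]
      | false => simp
    rw [hf, sorted_filter_dedup]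
  · rw [sorted_filter_dedup]
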